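-- pv_equiv track=rewrite | github.com/nvenegas-oliva/training | hacker-rank/algorithms/grading_students.py | solve
-- ===== SOURCE A (Python) =====
-- def next_mult(num, mult):
--     num = num + 1
--     while num % mult != 0:
--         num = num + 1
--     return num
--
-- def solve(grades):
--     result = []
--     for g in grades:
--         if g >= 38 and next_mult(g, 5) - g < 3:
--             result.append(next_mult(g, 5))
--         else:
--             result.append(g)
--     return result
-- ===== SOURCE B (Python) =====
-- def solve(grades):
--     return [g + (5 - g % 5) if g >= 38 and g % 5 >= 3 else g for g in grades]
-- ===== Notes on version B (the rewrite author's own statement) =====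
-- stated objective: simpler
-- what changed: Replaces the increment-until-divisible next_mult search (called twice per rounded grade) and the explicit accumulator loop with a single list comprehension using the modular closed form g + (5 - g % 5) when g % 5 >= 3.
import Mathlib
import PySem

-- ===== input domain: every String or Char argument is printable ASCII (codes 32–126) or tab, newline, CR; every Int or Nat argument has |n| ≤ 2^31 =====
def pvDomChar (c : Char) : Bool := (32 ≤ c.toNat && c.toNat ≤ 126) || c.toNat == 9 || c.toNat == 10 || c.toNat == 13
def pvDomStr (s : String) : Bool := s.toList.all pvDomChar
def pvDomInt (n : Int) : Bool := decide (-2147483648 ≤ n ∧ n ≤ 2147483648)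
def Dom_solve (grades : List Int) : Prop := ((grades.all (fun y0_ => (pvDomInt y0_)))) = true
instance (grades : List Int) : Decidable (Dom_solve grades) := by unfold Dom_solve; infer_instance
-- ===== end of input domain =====

-- ===== PORT A =====
-- B eliminates the next_mult increment-search helper in favour of a modular closed form; objective: simpler.
-- helper next_mult specialized to its only call site mult=5 (Python's while-loop as structural
-- recursion; the fuel 5 only makes the loop total — it always exits within 4 iterations since
-- num % 5 reaches 0 after at most 4 increments, so the 0-fuel branch is never taken)
def nextMultLoop : Nat → Int → Int
  | 0, num => num
  | k + 1, num => if PySem.Int.mod num 5 ≠ 0 then nextMultLoop k (num + 1) else num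

-- next_mult(num, 5): num = num + 1, then the while loop
def next_mult (num : Int) : Int := nextMultLoop 5 (num + 1)

def solve (grades : List Int) : List Int :=
  grades.foldl (fun result g =>
    if g ≥ 38 ∧ next_mult g - g < 3 then result ++ [next_mult g]
    else result ++ [g]) []

-- ===== PORT B =====
def solve_alt (grades : List Int) : List Int :=
  grades.map (fun g =>
    if g ≥ 38 ∧ PySem.Int.mod g 5 ≥ 3 then g + (5 - PySem.Int.mod g 5) else g)

-- ===== PRECONDITION & SPEC =====
def Spec_solve (grades : List Int) (out : List Int) : Prop := out = solve_alt grades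
instance (grades : List Int) (out : List Int) : Decidable (Spec_solve grades out) := by unfold Spec_solve; infer_instance

-- ===== CLAIM =====
def Claim_equal_solve : Prop := ∀ (grades : List Int), Dom_solve grades → Spec_solve grades (solve grades)

-- ===== LEMMAS AND PROOFS =====
theorem nextMultLoop_eq (num : Int) :
    nextMultLoop 5 num = num + (5 - PySem.Int.mod num 5) % 5 := by
  simp only [nextMultLoop, PySem.Int.mod_eq_emod_of_pos (show (0:Int) < 5 by norm_num)]
  split_ifs <;> omega

theorem elem_eq (g : Int) :
    (if g ≥ 38 ∧ next_mult g - g < 3 then next_mult g else g)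
      = (if g ≥ 38 ∧ PySem.Int.mod g 5 ≥ 3 then g + (5 - PySem.Int.mod g 5) else g) := by
  have h := nextMultLoop_eq (g + 1)
  simp only [next_mult, h, PySem.Int.mod_eq_emod_of_pos (show (0:Int) < 5 by norm_num)]
  split_ifs with h1 h2 h2 <;> omega

theorem foldl_eq (grades : List Int) (acc : List Int) :
    grades.foldl (fun result g =>
      if g ≥ 38 ∧ next_mult g - g < 3 then result ++ [next_mult g]
      else result ++ [g]) acc
    = acc ++ grades.map (fun g =>
        if g ≥ 38 ∧ PySem.Int.mod g 5 ≥ 3 then g + (5 - PySem.Int.mod g 5) else g) := by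
  induction grades generalizing acc with
  | nil => simp
  | cons g gs ih =>
    have he := elem_eq g
    simp only [List.foldl, List.map, ← he]
    split_ifs with hc
    · rw [ih]; simp
    · rw [ih]; simp

-- ===== VERDICT =====
theorem solve_spec : Claim_equal_solve := by
  intro grades _
  unfold Spec_solve solve solve_alt
  simpa using foldl_eq grades []
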